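-- pv_equiv track=rewrite | github.com/MarijeTromp/BEP_How_To_Train_Your_Dragon | search/gen_prog/vanilla_GP_alternatives/selection.py | truncation_selection_selection
-- ===== SOURCE A (Python) =====
-- import copy
--
-- def truncation_selection_selection(current_gen):
--     N = len(current_gen)
--     p = 0.25
--     select_quantity = int(N * p)
--     select_iterations = int(1/p)
--
--     intermediate_gen = []
--
--     gen = copy.deepcopy(current_gen)
--     gen.sort(reverse=True)
--
--     for i in range(select_iterations):
--         for j in range(select_quantity):
--             intermediate_gen.append(gen[j][1])
--
--     return intermediate_gen
-- ===== SOURCE B (Python) =====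
-- import heapq
--
-- def truncation_selection_selection(current_gen):
--     select_quantity = len(current_gen) // 4
--     block = [x[1] for x in heapq.nlargest(select_quantity, current_gen)]
--     return block * 4
-- ===== Notes on version B (the rewrite author's own statement) =====
-- stated objective: idiomatic
-- what changed: Replaces deepcopy + full in-place sort + nested index loops with a bounded-heap top-k selection (heapq.nlargest) followed by list repetition (block * 4).
import Mathlib
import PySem

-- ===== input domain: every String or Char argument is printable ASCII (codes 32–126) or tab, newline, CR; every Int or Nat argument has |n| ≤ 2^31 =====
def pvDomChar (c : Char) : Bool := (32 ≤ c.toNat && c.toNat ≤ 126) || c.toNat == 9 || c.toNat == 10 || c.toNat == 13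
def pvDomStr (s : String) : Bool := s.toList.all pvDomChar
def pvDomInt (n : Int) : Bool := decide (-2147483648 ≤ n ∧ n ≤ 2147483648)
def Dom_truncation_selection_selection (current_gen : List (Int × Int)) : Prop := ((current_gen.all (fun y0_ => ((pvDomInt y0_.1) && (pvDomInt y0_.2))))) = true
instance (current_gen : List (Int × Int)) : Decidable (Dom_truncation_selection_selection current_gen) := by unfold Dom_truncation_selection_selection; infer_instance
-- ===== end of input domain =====

-- B replaces A's deepcopy + full in-place sort + nested index loops by a top-k selection
-- (heapq.nlargest) followed by list repetition; equally idiomatic, same result.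
-- A mutates only its own deep copy, so there is no observable side effect to mirror.


-- ===== PORT A =====
-- int(N * 0.25) : N * 0.25 is exact in IEEE double for 0 ≤ N ≤ 2^31 and equals N/4;
-- int() truncates toward zero and N ≥ 0, so this is exactly floor division N // 4.
-- int(1/0.25) = 4 exactly.  gen[j] is always in range (j < N//4 ≤ len gen), so pyGetD is exact.
def truncation_selection_selection (current_gen : List (Int × Int)) : List Int :=
  let N : Int := current_gen.length
  let select_quantity : Int := PySem.Int.floordiv N 4
  let select_iterations : Int := 4
  let gen : List (Int × Int) :=
    PySem.List.sorted2 current_gen (fun x => x.1) (fun x => x.2) true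
  (PySem.List.pyRange 0 select_iterations 1).foldl (fun acc _i =>
    (PySem.List.pyRange 0 select_quantity 1).foldl (fun acc2 j =>
      acc2 ++ [(PySem.List.pyGetD gen j (0, 0)).2]) acc) []

-- ===== PORT B =====
-- heapq.nlargest(k, xs) is, per its documentation, sorted(xs, reverse=True)[:k].
def truncation_selection_selection_alt (current_gen : List (Int × Int)) : List Int :=
  let select_quantity : Nat := current_gen.length / 4
  let block : List Int :=
    ((PySem.List.sorted2 current_gen (fun x => x.1) (fun x => x.2) true).take select_quantity).map
      (fun x => x.2)
  PySem.List.pyRepeat block 4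

-- ===== PRECONDITION & SPEC =====
def Spec_truncation_selection_selection (current_gen : List (Int × Int)) (out : List Int) : Prop := out = truncation_selection_selection_alt current_gen
instance (current_gen : List (Int × Int)) (out : List Int) : Decidable (Spec_truncation_selection_selection current_gen out) := by unfold Spec_truncation_selection_selection; infer_instance

-- ===== CLAIM (what is proved, stated in full; the proofs are below) =====
def Claim_equal_truncation_selection_selection : Prop := ∀ (current_gen : List (Int × Int)), Dom_truncation_selection_selection current_gen → Spec_truncation_selection_selection current_gen (truncation_selection_selection current_gen)

-- ===== LEMMAS AND PROOFS =====

-- indexing the first k elements one by one reads exactly the take-k prefix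
theorem pv_map_range_getD {α β : Type} (f : α → β) (xs : List α) (k : Nat) (d : α)
    (hk : k ≤ xs.length) :
    (List.range k).map (fun j => f (xs.getD j d)) = (xs.take k).map f := by
  apply List.ext_getElem
  · simp [hk]
  · intro i h1 h2
    simp at h1 h2 ⊢
    rw [List.getElem?_eq_getElem (by omega)]
    simp

-- the inner j-loop of A appends exactly the mapped take-k prefix of gen
theorem pv_inner_loop (gen : List (Int × Int)) (k : Nat) (hk : k ≤ gen.length)
    (acc : List Int) :
    (PySem.List.pyRange 0 (k : Int) 1).foldl (fun acc2 j =>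
        acc2 ++ [(PySem.List.pyGetD gen j (0, 0)).2]) acc
      = acc ++ (gen.take k).map (fun x => x.2) := by
  rw [PySem.List.foldl_append_singleton_eq_map, PySem.List.pyRange_one]
  simp only [sub_zero, Int.toNat_natCast, List.map_map]
  rw [← pv_map_range_getD (fun x => x.2) gen k (0, 0) hk]
  congr 1
  apply List.map_congr_left
  intro j _
  simp [PySem.List.pyGetD_natCast]

theorem truncation_selection_selection_eq_alt (current_gen : List (Int × Int)) :
    truncation_selection_selection current_gen
      = truncation_selection_selection_alt current_gen := by
  unfold truncation_selection_selection truncation_selection_selection_alt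
  have hq : PySem.Int.floordiv (current_gen.length : Int) 4
      = ((current_gen.length / 4 : Nat) : Int) := by
    exact_mod_cast PySem.Int.floordiv_natCast current_gen.length 4
  set gen := PySem.List.sorted2 current_gen (fun x => x.1) (fun x => x.2) true with hgen
  have hlen : current_gen.length / 4 ≤ gen.length := by
    rw [hgen, (PySem.List.sorted2_perm current_gen (fun x => x.1) (fun x => x.2) true).length_eq]
    omega
  simp only [hq]
  have h4 : PySem.List.pyRange 0 4 1 = [0, 1, 2, 3] := by decide
  rw [h4]
  simp only [List.foldl_cons, List.foldl_nil]
  rw [pv_inner_loop gen _ hlen, pv_inner_loop gen _ hlen,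
      pv_inner_loop gen _ hlen, pv_inner_loop gen _ hlen]
  simp [PySem.List.pyRepeat, List.replicate]

-- ===== VERDICT (by name: the statement is the Claim_ definition above) =====
theorem truncation_selection_selection_spec : Claim_equal_truncation_selection_selection := by
  intro current_gen _
  unfold Spec_truncation_selection_selection
  exact truncation_selection_selection_eq_alt current_gen
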